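-- pv_equiv track=rewrite | github.com/kz23szk/atcoder-codes | tessoku-book/chapter04/a23.py | to_binary_num_list
-- ===== SOURCE A (Python) =====
-- def to_binary_num_list(n, item_num):
--     l = []
--     while n > 0:
--         l.append(n % 2)
--         n //= 2
--     for i in range(item_num - len(l)):
--         l.append(0)
--     return l
-- ===== SOURCE B (Python) =====
-- def to_binary_num_list(n, item_num):
--     m = n if n > 0 else 0
--     length = max(item_num, m.bit_length())
--     return [(m >> i) & 1 for i in range(length)]
-- ===== Notes on version B (the rewrite author's own statement) =====
-- stated objective: idiomatic
-- what changed: Replaces A's destructive mod/div extraction loop plus a separate zero-padding loop with a single indexed bit-shift comprehension over a length precomputed via bit_length.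
import Mathlib
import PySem

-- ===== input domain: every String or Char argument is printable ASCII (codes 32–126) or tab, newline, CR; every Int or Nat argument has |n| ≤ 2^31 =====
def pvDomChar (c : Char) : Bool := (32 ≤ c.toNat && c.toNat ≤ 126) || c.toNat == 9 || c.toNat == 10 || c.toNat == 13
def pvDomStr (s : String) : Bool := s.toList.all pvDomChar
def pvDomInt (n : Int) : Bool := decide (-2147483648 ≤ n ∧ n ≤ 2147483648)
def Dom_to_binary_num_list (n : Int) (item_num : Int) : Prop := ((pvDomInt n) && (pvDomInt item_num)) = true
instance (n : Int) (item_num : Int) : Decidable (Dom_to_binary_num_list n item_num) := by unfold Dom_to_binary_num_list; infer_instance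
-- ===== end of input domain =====

-- B replaces A's destructive mod/div extraction loop plus separate zero-padding loop
-- with one indexed bit-shift pass over a precomputed length (idiomatic; same cost).


-- ===== PORT A =====
-- the 'while n > 0' extraction loop of A
def pvBitsA (n : Int) : List Int :=
  if _h : n > 0 then PySem.Int.mod n 2 :: pvBitsA (PySem.Int.floordiv n 2)
  else []
termination_by n.toNat
decreasing_by
  simp only [PySem.Int.floordiv]
  rw [Int.fdiv_eq_ediv_of_nonneg _ (by decide : (0:Int) ≤ 2)]
  omega

def to_binary_num_list (n : Int) (item_num : Int) : List Int :=
  let l := pvBitsA n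
  (PySem.List.pyRange 0 (item_num - l.length) 1).foldl (fun acc _ => acc ++ [0]) l

-- ===== PORT B =====
def to_binary_num_list_alt (n : Int) (item_num : Int) : List Int :=
  let m : Nat := if n > 0 then n.toNat else 0   -- m = n if n > 0 else 0 (nonnegative)
  let length : Int := max item_num (m.size : Int)   -- Nat.size = Python int.bit_length
  (PySem.List.pyRange 0 length 1).map (fun i => (((m >>> i.toNat) &&& 1 : Nat) : Int))

-- ===== PRECONDITION & SPEC =====
def Spec_to_binary_num_list (n : Int) (item_num : Int) (out : List Int) : Prop := out = to_binary_num_list_alt n item_num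
instance (n : Int) (item_num : Int) (out : List Int) : Decidable (Spec_to_binary_num_list n item_num out) := by unfold Spec_to_binary_num_list; infer_instance

-- ===== CLAIM (what is proved, stated in full; the proofs are below) =====
def Claim_equal_to_binary_num_list : Prop := ∀ (n : Int) (item_num : Int), Dom_to_binary_num_list n item_num → Spec_to_binary_num_list n item_num (to_binary_num_list n item_num)

-- ===== LEMMAS AND PROOFS =====

theorem pvSize_pos_eq (m : Nat) (h : 0 < m) : m.size = (m / 2).size + 1 := by
  conv_lhs => rw [← Nat.bit_bodd_div2 m]
  rw [Nat.size_bit (by rw [Nat.bit_bodd_div2]; omega), Nat.div2_val]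

-- the extraction loop produces exactly the bits indexed 0 .. size-1
theorem pvBitsA_eq (n : Int) :
    pvBitsA n = (List.range (if n > 0 then n.toNat else 0).size).map
      (fun i => ((((if n > 0 then n.toNat else 0) >>> i) &&& 1 : Nat) : Int)) := by
  by_cases h : n > 0
  · rw [pvBitsA]
    simp only [h, if_pos, dif_pos]
    have hrec := pvBitsA_eq (PySem.Int.floordiv n 2)
    have hfd : PySem.Int.floordiv n 2 = ((n.toNat / 2 : Nat) : Int) := by
      simp only [PySem.Int.floordiv]
      rw [Int.fdiv_eq_ediv_of_nonneg _ (by decide : (0:Int) ≤ 2)]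
      omega
    rw [hfd] at hrec ⊢
    by_cases h2 : ((n.toNat / 2 : Nat) : Int) > 0
    · rw [hrec]
      simp only [h2, if_pos, Int.toNat_natCast]
      rw [pvSize_pos_eq n.toNat (by omega), List.range_succ_eq_map]
      simp only [List.map_cons, List.map_map]
      congr 1
      · simp only [PySem.Int.mod, Nat.and_one_is_mod]
        rw [Int.fmod_eq_emod]
        simp only [show ((0:Int) ≤ 2 ∨ (2:Int) ∣ n) = True by simp, if_true]
        omega
      · apply List.map_congr_left
        intro i _
        simp [Function.comp, Nat.shiftRight_succ_inside]
    · have hz : n.toNat / 2 = 0 := by omega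
      have h1 : n.toNat = 1 := by omega
      rw [hrec]
      have hn : n = 1 := by omega
      subst hn
      norm_num [hz, PySem.Int.mod, Int.fmod_eq_emod]
  · rw [pvBitsA]
    simp [h]
termination_by n.toNat
decreasing_by
  simp only [PySem.Int.floordiv]
  rw [Int.fdiv_eq_ediv_of_nonneg _ (by decide : (0:Int) ≤ 2)]
  omega

theorem pvFoldl_zeros (l : List Int) (r : List Int) :
    r.foldl (fun acc _ => acc ++ [(0 : Int)]) l = l ++ List.replicate r.length 0 := by
  induction r generalizing l with
  | nil => simp
  | cons x xs ih => simp [List.foldl_cons, ih, List.replicate_succ]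

theorem to_binary_num_list_spec : Claim_equal_to_binary_num_list := by
  intro n item_num _
  unfold Spec_to_binary_num_list to_binary_num_list to_binary_num_list_alt
  simp only []
  set m : Nat := if n > 0 then n.toNat else 0 with hm
  have hb : pvBitsA n = (List.range m.size).map (fun i => (((m >>> i) &&& 1 : Nat) : Int)) := by
    rw [pvBitsA_eq]
  rw [hb, pvFoldl_zeros]
  rw [PySem.List.pyRange_one, PySem.List.pyRange_one]
  simp only [List.length_map, List.length_range, List.map_map]
  have hL : (max item_num (m.size : Int) - 0).toNat = m.size + (item_num - (m.size : Int) - 0).toNat := by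
    omega
  rw [hL, List.range_add, List.map_append, List.map_map]
  congr 1
  · apply List.map_congr_left
    intro i _
    simp [Function.comp]
  · apply Eq.symm
    rw [List.eq_replicate_iff]
    refine ⟨by simp, ?_⟩
    intro b hbmem
    simp only [List.mem_map, List.mem_range, Function.comp] at hbmem
    obtain ⟨k, _, hk⟩ := hbmem
    have hidx : ((0 : Int) + ((m.size + k : Nat) : Int)).toNat = m.size + k := by omega
    rw [hidx] at hk
    have hsh : m >>> (m.size + k) = 0 := by
      rw [Nat.shiftRight_eq_div_pow]
      exact Nat.div_eq_of_lt
        (Nat.lt_of_lt_of_le (Nat.lt_size_self m) (Nat.pow_le_pow_right (by decide) (by omega)))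
    rw [hsh] at hk
    simpa using hk.symm
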